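-- pv_equiv track=rewrite | github.com/MxDui/ALGOS | Practica02/sortkit/core/heap.py | _heap_sort_trace
-- ===== SOURCE A (Python) =====
-- from typing import List, Generator, Union
-- import copy
--
-- def _heap_sort_trace(arr: List[int]) -> Generator[List[int], None, List[int]]:
--     """
--     Generator version of heap sort that yields after each significant step.
--
--     Args:
--         arr: The list to be sorted
--
--     Yields:
--         The list at each step of the sorting process
--
--     Returns:
--         The final sorted list
--     """
--     n = len(arr)
--
--     # Build a max heap and yield after construction
--     for i in range(n // 2 - 1, -1, -1):
--         _heapify_trace(arr, n, i)
--
--     yield copy.deepcopy(arr)  # Yield after max heap is built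
--
--     # Extract elements one by one
--     for i in range(n - 1, 0, -1):
--         arr[0], arr[i] = arr[i], arr[0]  # Swap
--         _heapify_trace(arr, i, 0)
--         yield copy.deepcopy(arr)  # Yield after each extraction
--
--     return arr
--
-- def _heapify_trace(arr: List[int], n: int, i: int) -> None:
--     """
--     Trace-enabled version of the heapify function.
--     Identical to _heapify but used for tracing.
--
--     Args:
--         arr: The array to heapify
--         n: The size of the heap
--         i: The index of the root of the subtree to heapify
--     """
--     largest = i  # Initialize largest as root
--     left = 2 * i + 1  # Left child
--     right = 2 * i + 2  # Right child
--
--     # Check if left child exists and is greater than root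
--     if left < n and arr[left] > arr[largest]:
--         largest = left
--
--     # Check if right child exists and is greater than the largest so far
--     if right < n and arr[right] > arr[largest]:
--         largest = right
--
--     # If the largest is not the root
--     if largest != i:
--         arr[i], arr[largest] = arr[largest], arr[i]  # Swap
--
--         # Recursively heapify the affected subtree
--         _heapify_trace(arr, n, largest)
-- ===== SOURCE B (Python) =====
-- import copy
-- from typing import List, Generator
--
-- def _sift_down(arr, root, size):
--     """Iterative sift-down: repeatedly pick the larger child and swap it up."""
--     i = root
--     while True:
--         left = 2 * i + 1
--         if left >= size:
--             break
--         child = left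
--         right = left + 1
--         if right < size and arr[right] > arr[left]:
--             child = right
--         if arr[child] > arr[i]:
--             arr[i], arr[child] = arr[child], arr[i]
--             i = child
--         else:
--             break
--
-- def _heap_sort_trace(arr: List[int]) -> Generator[List[int], None, List[int]]:
--     n = len(arr)
--     start = n // 2 - 1
--     while start >= 0:
--         _sift_down(arr, start, n)
--         start -= 1
--     yield copy.deepcopy(arr)
--     end = n - 1
--     while end > 0:
--         arr[0], arr[end] = arr[end], arr[0]
--         _sift_down(arr, 0, end)
--         yield copy.deepcopy(arr)
--         end -= 1
--     return arr
-- ===== Notes on version B (the rewrite author's own statement) =====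
-- stated objective: idiomatic
-- what changed: Replaces the recursive two-if heapify with an iterative sift-down that first selects the larger child and then compares it with the parent, and drives both outer phases with explicit while-loops over a decrementing counter instead of for-loops over range.
import Mathlib
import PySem

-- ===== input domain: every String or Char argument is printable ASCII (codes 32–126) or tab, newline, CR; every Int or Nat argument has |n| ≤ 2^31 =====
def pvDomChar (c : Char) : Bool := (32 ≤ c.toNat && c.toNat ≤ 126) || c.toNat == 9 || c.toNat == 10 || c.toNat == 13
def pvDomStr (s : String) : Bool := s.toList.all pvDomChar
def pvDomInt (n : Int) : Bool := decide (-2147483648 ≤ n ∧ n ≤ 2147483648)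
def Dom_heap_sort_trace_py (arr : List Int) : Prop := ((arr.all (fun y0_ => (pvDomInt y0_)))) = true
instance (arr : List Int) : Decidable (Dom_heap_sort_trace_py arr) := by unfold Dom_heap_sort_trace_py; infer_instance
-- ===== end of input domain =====

-- B replaces A's recursive heapify by an iterative larger-child-first sift-down and while-loops;
-- equivalence is about the sequence of yielded snapshots (both Pythons mutate `arr` in place identically).

-- ===== PORT A =====
-- Both Pythons index only with 0 ≤ idx < size ≤ len(arr), so `List.getD idx 0` is exact there.
-- `arr[i], arr[j] = arr[j], arr[i]`:
def pySwap (arr : List Int) (i j : Nat) : List Int :=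
  (arr.set i (arr.getD j 0)).set j (arr.getD i 0)

-- the two `if` tests of _heapify_trace computing `largest` (kept as a helper for the termination proof)
def chooseA (arr : List Int) (n i : Nat) : Nat :=
  let lg1 := if 2*i+1 < n ∧ arr.getD (2*i+1) 0 > arr.getD i 0 then 2*i+1 else i
  if 2*i+2 < n ∧ arr.getD (2*i+2) 0 > arr.getD lg1 0 then 2*i+2 else lg1

theorem chooseA_bounds (arr : List Int) (n i : Nat) (h : chooseA arr n i ≠ i) :
    i < chooseA arr n i ∧ chooseA arr n i < n := by
  unfold chooseA at h ⊢
  dsimp only at h ⊢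
  split_ifs at h ⊢ <;> omega

-- _heapify_trace (mutation modelled by returning the updated list)
def heapifyA (arr : List Int) (n i : Nat) : List Int :=
  if h : chooseA arr n i ≠ i then
    heapifyA (pySwap arr i (chooseA arr n i)) n (chooseA arr n i)
  else arr
termination_by n - i
decreasing_by have := chooseA_bounds arr n i h; omega

def heap_sort_trace_py (arr : List Int) : List (List Int) :=
  let n := arr.length
  -- for i in range(n // 2 - 1, -1, -1): _heapify_trace(arr, n, i)
  let a1 := ((List.range (n / 2)).reverse).foldl (fun a i => heapifyA a n i) arr
  -- yield; then for i in range(n - 1, 0, -1): swap; heapify; yield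
  (((List.range (n - 1)).reverse.map (· + 1)).foldl
    (fun st i =>
      let a := heapifyA (pySwap st.2 0 i) i 0
      (st.1 ++ [a], a))
    ([a1], a1)).1

-- ===== PORT B =====
-- `child = right if (right < size and arr[right] > arr[left]) else left`
def chooseB (arr : List Int) (size i : Nat) : Nat :=
  if 2*i+2 < size ∧ arr.getD (2*i+2) 0 > arr.getD (2*i+1) 0 then 2*i+2 else 2*i+1

theorem chooseB_bounds (arr : List Int) (size i : Nat) (h : 2*i+1 < size) :
    i < chooseB arr size i ∧ chooseB arr size i < size := by
  unfold chooseB; split_ifs <;> omega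

-- _sift_down's while-loop (state: the current index i)
def siftB (arr : List Int) (i size : Nat) : List Int :=
  if h : 2*i+1 < size then
    if arr.getD (chooseB arr size i) 0 > arr.getD i 0 then
      siftB (pySwap arr i (chooseB arr size i)) (chooseB arr size i) size
    else arr
  else arr
termination_by size - i
decreasing_by have := chooseB_bounds arr size i h; omega

-- `while start >= 0: _sift_down(arr, start, n); start -= 1`  (s = start + 1)
def buildB (arr : List Int) (n s : Nat) : List Int :=
  match s with
  | 0 => arr
  | s + 1 => buildB (siftB arr s n) n s

-- `while end > 0: swap; _sift_down(arr, 0, end); yield; end -= 1`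
def extractB (arr : List Int) (e : Nat) : List (List Int) :=
  match e with
  | 0 => []
  | e + 1 =>
    let a := siftB (pySwap arr 0 (e + 1)) 0 (e + 1)
    a :: extractB a e

def heap_sort_trace_py_alt (arr : List Int) : List (List Int) :=
  let n := arr.length
  let a1 := buildB arr n (n / 2)
  a1 :: extractB a1 (n - 1)

-- ===== PRECONDITION & SPEC =====
def Spec_heap_sort_trace_py (arr : List Int) (out : List (List Int)) : Prop := out = heap_sort_trace_py_alt arr
instance (arr : List Int) (out : List (List Int)) : Decidable (Spec_heap_sort_trace_py arr out) := by unfold Spec_heap_sort_trace_py; infer_instance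

-- ===== CLAIM (what is proved, stated in full; the proofs are below) =====
def Claim_equal_heap_sort_trace_py : Prop := ∀ (arr : List Int), Dom_heap_sort_trace_py arr → Spec_heap_sort_trace_py arr (heap_sort_trace_py arr)

-- ===== LEMMAS AND PROOFS =====

-- The two sift-downs compute the same list.
theorem sift_eq_heapify (k : Nat) : ∀ (arr : List Int) (n i : Nat), n - i ≤ k →
    siftB arr i n = heapifyA arr n i := by
  induction k with
  | zero =>
    intro arr n i hk
    rw [siftB, heapifyA]
    have h1 : ¬ (2*i+1 < n) := by omega
    have h2 : chooseA arr n i = i := by unfold chooseA; dsimp only; split_ifs <;> omega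
    simp [h1, h2]
  | succ k ih =>
    intro arr n i hk
    rw [siftB, heapifyA]
    by_cases hl : 2*i+1 < n
    · simp only [hl, dif_pos]
      unfold chooseA chooseB
      dsimp only
      split_ifs with h1 h2 h3 h4 h5 h6 h7 <;>
        first
          | (exact ih _ _ _ (by omega))
          | rfl
          | omega
    · have h2 : chooseA arr n i = i := by unfold chooseA; dsimp only; split_ifs <;> omega
      simp [hl, h2]

theorem sift_eq_heapify' (arr : List Int) (n i : Nat) : siftB arr i n = heapifyA arr n i :=
  sift_eq_heapify (n - i) arr n i (le_refl _)

-- Build phase: folding heapifyA over [s-1, …, 0] equals buildB's countdown loop.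
theorem build_eq (n : Nat) : ∀ (s : Nat) (arr : List Int),
    ((List.range s).reverse).foldl (fun a i => heapifyA a n i) arr = buildB arr n s := by
  intro s
  induction s with
  | zero => intro arr; simp [buildB]
  | succ s ih =>
    intro arr
    rw [List.range_succ, List.reverse_append]
    simp only [List.reverse_cons, List.reverse_nil, List.nil_append, List.singleton_append,
      List.foldl_cons]
    rw [ih, buildB, sift_eq_heapify']

-- Extraction phase: the snapshot-accumulating fold over [e, …, 1] appends extractB's list.
theorem extract_eq : ∀ (e : Nat) (arr : List Int) (snaps : List (List Int)),
    (((List.range e).reverse.map (· + 1)).foldl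
      (fun st i =>
        let a := heapifyA (pySwap st.2 0 i) i 0
        (st.1 ++ [a], a))
      (snaps, arr)).1 = snaps ++ extractB arr e := by
  intro e
  induction e with
  | zero => intro arr snaps; simp [extractB]
  | succ e ih =>
    intro arr snaps
    rw [List.range_succ, List.reverse_append]
    simp only [List.reverse_cons, List.reverse_nil, List.nil_append, List.singleton_append,
      List.map_cons, List.foldl_cons]
    rw [ih]
    rw [extractB]
    simp [sift_eq_heapify', List.append_assoc]

-- ===== VERDICT (by name: the statement is the Claim_ definition above) =====
theorem heap_sort_trace_py_spec : Claim_equal_heap_sort_trace_py := by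
  intro arr _
  unfold Spec_heap_sort_trace_py heap_sort_trace_py heap_sort_trace_py_alt
  dsimp only
  rw [build_eq, extract_eq]
  rfl
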